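-- pv_equiv track=rewrite | github.com/alex-shumilov/JiraScope | src/jirascope/rag/query_processor.py | _get_semantic_variants
-- ===== SOURCE A (Python) =====
-- def _get_semantic_variants(query: str) -> list[str]:
--     """Get semantic variants for query terms."""
--     variants = []
--
--     # Technical debt related terms
--     if any(term in query.lower() for term in ["debt", "refactor", "cleanup"]):
--         variants.extend(["technical debt", "refactoring", "code quality", "maintenance"])
--
--     # Performance related terms
--     if any(term in query.lower() for term in ["slow", "performance", "speed"]):
--         variants.extend(["performance", "optimization", "latency", "speed"])
--
--     # Bug related terms
--     if any(term in query.lower() for term in ["bug", "error", "issue"]):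
--         variants.extend(["defect", "problem", "failure", "broken"])
--
--     return variants
-- ===== SOURCE B (Python) =====
-- _TRIGGERS = [
--     ("debt", 0), ("refactor", 0), ("cleanup", 0),
--     ("slow", 1), ("performance", 1), ("speed", 1),
--     ("bug", 2), ("error", 2), ("issue", 2),
-- ]
--
-- _VARIANTS = [
--     ["technical debt", "refactoring", "code quality", "maintenance"],
--     ["performance", "optimization", "latency", "speed"],
--     ["defect", "problem", "failure", "broken"],
-- ]
--
--
-- def _get_semantic_variants(query: str) -> list[str]:
--     """Get semantic variants for query terms.
--
--     Single left-to-right scan over the lowercased query: at each position,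
--     try to match every trigger pattern (a naive multi-pattern matcher),
--     recording which rules fired, then emit the variant lists of the
--     fired rules in rule order.
--     """
--     q = query.lower()
--     fired = [False, False, False]
--     for i in range(len(q)):
--         for t, r in _TRIGGERS:
--             if q.startswith(t, i):
--                 fired[r] = True
--     out = []
--     for f, vs in zip(fired, _VARIANTS):
--         if f:
--             out += vs
--     return out
-- ===== Notes on version B (the rewrite author's own statement) =====
-- stated objective: alternative
-- what changed: Replaces per-rule substring membership tests with a single left-to-right scan of the lowercased query that tries every trigger pattern at each position (naive multi-pattern matcher) into a fired-rules vector, then emits the variant lists of fired rules.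
import Mathlib
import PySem

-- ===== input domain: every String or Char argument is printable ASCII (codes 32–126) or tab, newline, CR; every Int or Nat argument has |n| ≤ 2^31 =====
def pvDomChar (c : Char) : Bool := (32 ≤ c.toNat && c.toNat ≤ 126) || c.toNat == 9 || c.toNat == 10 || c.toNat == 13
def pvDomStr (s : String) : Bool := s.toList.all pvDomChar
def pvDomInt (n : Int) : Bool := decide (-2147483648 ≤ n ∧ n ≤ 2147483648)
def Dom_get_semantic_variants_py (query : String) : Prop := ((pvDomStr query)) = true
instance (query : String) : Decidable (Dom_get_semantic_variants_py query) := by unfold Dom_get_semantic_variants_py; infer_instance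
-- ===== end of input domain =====

-- B replaces A's per-rule substring membership tests by a single left-to-right scan of the
-- lowercased query that tries every trigger pattern at each position into a fired-rules
-- vector, then emits the variant lists of the fired rules (objective: alternative).

-- ===== PORT A =====
def get_semantic_variants_py (query : String) : List String :=
  let variants : List String := []
  let variants :=
    if (["debt", "refactor", "cleanup"]).any (fun term => PySem.Str.isIn term (PySem.Str.lower query)) then
      variants ++ ["technical debt", "refactoring", "code quality", "maintenance"]
    else variants
  let variants :=
    if (["slow", "performance", "speed"]).any (fun term => PySem.Str.isIn term (PySem.Str.lower query)) then
      variants ++ ["performance", "optimization", "latency", "speed"]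
    else variants
  let variants :=
    if (["bug", "error", "issue"]).any (fun term => PySem.Str.isIn term (PySem.Str.lower query)) then
      variants ++ ["defect", "problem", "failure", "broken"]
    else variants
  variants

-- ===== PORT B =====
def svTriggers : List (String × Nat) :=
  [("debt", 0), ("refactor", 0), ("cleanup", 0),
   ("slow", 1), ("performance", 1), ("speed", 1),
   ("bug", 2), ("error", 2), ("issue", 2)]

def svVariants : List (List String) :=
  [["technical debt", "refactoring", "code quality", "maintenance"],
   ["performance", "optimization", "latency", "speed"],
   ["defect", "problem", "failure", "broken"]]

-- q.startswith(t, i) is ported as Chars.startswith on the suffix (q.drop i) — exact for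
-- 0 ≤ i ≤ len(q), which is the range the loop visits.
def svStep (q : List Char) (fired : List Bool) (i : Nat) : List Bool :=
  svTriggers.foldl (fun fired tr =>
    if PySem.Chars.startswith (q.drop i) tr.1.toList then
      fired.set tr.2 true
    else fired) fired

def get_semantic_variants_py_alt (query : String) : List String :=
  let q := (PySem.Str.lower query).toList
  let fired := (List.range q.length).foldl (svStep q) [false, false, false]
  (fired.zip svVariants).foldl (fun out p => if p.1 then out ++ p.2 else out) []

-- ===== PRECONDITION & SPEC =====
def Spec_get_semantic_variants_py (query : String) (out : List String) : Prop := out = get_semantic_variants_py_alt query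
instance (query : String) (out : List String) : Decidable (Spec_get_semantic_variants_py query out) := by unfold Spec_get_semantic_variants_py; infer_instance

-- ===== CLAIM (what is proved, stated in full; the proofs are below) =====
def Claim_equal_get_semantic_variants_py : Prop := ∀ (query : String), Dom_get_semantic_variants_py query → Spec_get_semantic_variants_py query (get_semantic_variants_py query)

-- ===== LEMMAS AND PROOFS =====

-- "some trigger of this rule matches at position i of q"
def svHit (q : List Char) (ts : List String) (i : Nat) : Bool :=
  ts.any (fun t => PySem.Chars.startswith (q.drop i) t.toList)

theorem svGroup0 (q : List Char) (i : Nat) (a b c : Bool) :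
    List.foldl (fun fired (tr : String × Nat) =>
      if PySem.Chars.startswith (q.drop i) tr.1.toList then fired.set tr.2 true else fired)
      [a, b, c] [("debt", 0), ("refactor", 0), ("cleanup", 0)] =
      [a || svHit q ["debt", "refactor", "cleanup"] i, b, c] := by
  by_cases h1 : PySem.Chars.startswith (q.drop i) "debt".toList <;>
  by_cases h2 : PySem.Chars.startswith (q.drop i) "refactor".toList <;>
  by_cases h3 : PySem.Chars.startswith (q.drop i) "cleanup".toList <;>
    simp_all [svHit, List.foldl, List.set]

theorem svGroup1 (q : List Char) (i : Nat) (a b c : Bool) :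
    List.foldl (fun fired (tr : String × Nat) =>
      if PySem.Chars.startswith (q.drop i) tr.1.toList then fired.set tr.2 true else fired)
      [a, b, c] [("slow", 1), ("performance", 1), ("speed", 1)] =
      [a, b || svHit q ["slow", "performance", "speed"] i, c] := by
  by_cases h1 : PySem.Chars.startswith (q.drop i) "slow".toList <;>
  by_cases h2 : PySem.Chars.startswith (q.drop i) "performance".toList <;>
  by_cases h3 : PySem.Chars.startswith (q.drop i) "speed".toList <;>
    simp_all [svHit, List.foldl, List.set]

theorem svGroup2 (q : List Char) (i : Nat) (a b c : Bool) :
    List.foldl (fun fired (tr : String × Nat) =>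
      if PySem.Chars.startswith (q.drop i) tr.1.toList then fired.set tr.2 true else fired)
      [a, b, c] [("bug", 2), ("error", 2), ("issue", 2)] =
      [a, b, c || svHit q ["bug", "error", "issue"] i] := by
  by_cases h1 : PySem.Chars.startswith (q.drop i) "bug".toList <;>
  by_cases h2 : PySem.Chars.startswith (q.drop i) "error".toList <;>
  by_cases h3 : PySem.Chars.startswith (q.drop i) "issue".toList <;>
    simp_all [svHit, List.foldl, List.set]

theorem svStep_eq (q : List Char) (a b c : Bool) (i : Nat) :
    svStep q [a, b, c] i =
      [a || svHit q ["debt", "refactor", "cleanup"] i,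
       b || svHit q ["slow", "performance", "speed"] i,
       c || svHit q ["bug", "error", "issue"] i] := by
  have hsplit : svTriggers =
      [("debt", 0), ("refactor", 0), ("cleanup", 0)] ++
      [("slow", 1), ("performance", 1), ("speed", 1)] ++
      [("bug", 2), ("error", 2), ("issue", 2)] := rfl
  unfold svStep
  rw [hsplit, List.foldl_append, List.foldl_append, svGroup0, svGroup1, svGroup2]

theorem svScan_eq (q : List Char) (n : Nat) :
    (List.range n).foldl (svStep q) [false, false, false] =
      [(List.range n).any (fun i => svHit q ["debt", "refactor", "cleanup"] i),
       (List.range n).any (fun i => svHit q ["slow", "performance", "speed"] i),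
       (List.range n).any (fun i => svHit q ["bug", "error", "issue"] i)] := by
  induction n with
  | zero => simp
  | succ m ih =>
      simp [List.range_succ, List.foldl_append, ih, svStep_eq, List.any_append]

-- any distributes over || pointwise
theorem svAnyOr (l : List Nat) (f g : Nat → Bool) :
    (l.any fun i => f i || g i) = (l.any f || l.any g) := by
  induction l with
  | nil => rfl
  | cons x xs ih => simp [List.any_cons, ih, Bool.or_assoc, Bool.or_left_comm]

-- scanning all positions of q for a nonempty pattern is exactly substring membership
theorem svAny_eq_isIn (q : List Char) (t : String) (ht : t.toList ≠ []) :
    (List.range q.length).any (fun i => PySem.Chars.startswith (q.drop i) t.toList) =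
      PySem.Chars.isIn t.toList q := by
  by_cases h : PySem.Chars.isIn t.toList q = true
  · rw [h]
    obtain ⟨j, hj⟩ := (PySem.Chars.exists_prefix_drop_iff_isIn t.toList q).mpr h
    have hjlt : j < q.length := by
      by_contra hge
      have hnil : q.drop j = [] := List.drop_eq_nil_of_le (by omega)
      rw [hnil] at hj
      exact ht (List.prefix_nil.mp hj)
    refine List.any_eq_true.mpr ⟨j, List.mem_range.mpr hjlt, ?_⟩
    exact (PySem.Chars.startswith_iff _ _).mpr hj
  · rw [eq_false_of_ne_true h]
    refine List.any_eq_false.mpr (fun i _ => ?_)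
    intro hsw
    exact h ((PySem.Chars.exists_prefix_drop_iff_isIn t.toList q).mp
      ⟨i, (PySem.Chars.startswith_iff _ _).mp hsw⟩)

-- ===== VERDICT (by name: the statement is the Claim_ definition above) =====
theorem get_semantic_variants_py_spec : Claim_equal_get_semantic_variants_py := by
  intro query _
  unfold Spec_get_semantic_variants_py get_semantic_variants_py get_semantic_variants_py_alt
  dsimp only
  rw [svScan_eq]
  simp only [svHit, List.any_cons, List.any_nil, Bool.or_false, svAnyOr]
  rw [svAny_eq_isIn _ "debt" (by decide), svAny_eq_isIn _ "refactor" (by decide),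
      svAny_eq_isIn _ "cleanup" (by decide), svAny_eq_isIn _ "slow" (by decide),
      svAny_eq_isIn _ "performance" (by decide), svAny_eq_isIn _ "speed" (by decide),
      svAny_eq_isIn _ "bug" (by decide), svAny_eq_isIn _ "error" (by decide),
      svAny_eq_isIn _ "issue" (by decide)]
  simp only [svVariants, List.zip, List.zipWith, List.foldl, List.any_cons, List.any_nil,
    PySem.Str.isIn_eq, Bool.or_false]
  split_ifs <;> simp_all
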